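-- pv_equiv track=rewrite | github.com/hvsouza/AoC2024 | 07/7.py | try_options
-- ===== SOURCE A (Python) =====
-- def try_options(listofmultiplications, values, vref):
--
--     match=False
--     for dtypes in listofmultiplications:
--         res = values[0]
--         for dtype, v in zip(dtypes, values[1:]):
--             if dtype>0:
--                 res*=v
--             else:
--                 res+=v
--         if res == vref:
--             match=True
--     return match
-- ===== SOURCE B (Python) =====
-- # B: backward check per pattern — start from vref and undo the operations from the
-- # right (exact-divisibility pruning for '*', subtraction for '+'), short-circuiting
-- # over patterns with any().
-- def _reach(dtypes, values, target):
--     pairs = list(zip(dtypes, values[1:]))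
--     for dtype, v in reversed(pairs):
--         if dtype > 0:
--             if v == 0:
--                 return target == 0
--             if target % v != 0:
--                 return False
--             target //= v
--         else:
--             target -= v
--     return target == values[0]
--
-- def try_options(listofmultiplications, values, vref):
--     return any(_reach(dtypes, values, vref) for dtypes in listofmultiplications)
-- ===== Notes on version B (the rewrite author's own statement) =====
-- stated objective: alternative
-- what changed: B checks each operation pattern backwards from the target (exact-divisibility pruning for multiplications, subtraction for additions) and short-circuits with any(), instead of A's forward evaluation of every pattern with a match flag.
import Mathlib
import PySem

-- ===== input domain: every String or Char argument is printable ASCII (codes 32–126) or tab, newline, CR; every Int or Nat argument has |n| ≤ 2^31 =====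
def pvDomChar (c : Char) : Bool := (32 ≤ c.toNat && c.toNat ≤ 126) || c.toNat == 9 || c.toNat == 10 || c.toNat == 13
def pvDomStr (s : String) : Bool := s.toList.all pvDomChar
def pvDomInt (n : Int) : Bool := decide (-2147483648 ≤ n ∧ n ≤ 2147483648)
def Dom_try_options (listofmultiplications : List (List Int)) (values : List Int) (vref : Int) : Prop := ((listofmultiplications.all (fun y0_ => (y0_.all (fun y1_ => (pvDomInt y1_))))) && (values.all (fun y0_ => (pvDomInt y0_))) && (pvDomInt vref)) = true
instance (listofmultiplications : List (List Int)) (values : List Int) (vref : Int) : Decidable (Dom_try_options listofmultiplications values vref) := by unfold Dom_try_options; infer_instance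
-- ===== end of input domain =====

-- B re-checks each pattern backwards from the target (divisibility pruning, any() short-circuit)
-- instead of A's forward evaluation of every pattern with a match flag; same results on all
-- non-raising inputs (alternative algorithm, no speed claim).


-- ===== PORT A =====
-- values[0] is ported as (pyGet? values 0).getD 0: Pre_ guarantees it is never the
-- 'none' (IndexError) case when the outer loop runs at least once.
def try_options (listofmultiplications : List (List Int)) (values : List Int) (vref : Int) : Bool :=
  listofmultiplications.foldl (fun match_ dtypes =>
    let res := (dtypes.zip (PySem.List.slice values (some 1) none)).foldl
      (fun r dv => if dv.1 > 0 then r * dv.2 else r + dv.2)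
      ((PySem.List.pyGet? values 0).getD 0)
    if res == vref then true else match_) false

-- ===== PORT B =====
-- _reach's loop over reversed(pairs): structural recursion on the reversed pair list.
def pvReachAux (first : Int) : List (Int × Int) → Int → Bool
  | [], target => target == first
  | (dtype, v) :: rest, target =>
    if dtype > 0 then
      if v == 0 then target == 0
      else if PySem.Int.mod target v == 0 then pvReachAux first rest (PySem.Int.floordiv target v)
      else false
    else pvReachAux first rest (target - v)

def pvReach (dtypes : List Int) (values : List Int) (target : Int) : Bool :=
  pvReachAux ((PySem.List.pyGet? values 0).getD 0)
    ((dtypes.zip (PySem.List.slice values (some 1) none)).reverse) target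

def try_options_alt (listofmultiplications : List (List Int)) (values : List Int) (vref : Int) : Bool :=
  listofmultiplications.any (fun dtypes => pvReach dtypes values vref)

-- ===== PRECONDITION & SPEC =====
-- Python A raises IndexError on values[0] exactly when the pattern list is nonempty and values is empty.
def Pre_try_options (listofmultiplications : List (List Int)) (values : List Int) (vref : Int) : Prop :=
  listofmultiplications ≠ [] → values ≠ []
instance (listofmultiplications : List (List Int)) (values : List Int) (vref : Int) : Decidable (Pre_try_options listofmultiplications values vref) := by unfold Pre_try_options; infer_instance
def pvWitness_try_options : List (List Int) × List Int × Int := ([[1, -1]], [2, 3, 4], 10)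
def Spec_try_options (listofmultiplications : List (List Int)) (values : List Int) (vref : Int) (out : Bool) : Prop := out = try_options_alt listofmultiplications values vref
instance (listofmultiplications : List (List Int)) (values : List Int) (vref : Int) (out : Bool) : Decidable (Spec_try_options listofmultiplications values vref out) := by unfold Spec_try_options; infer_instance

-- ===== CLAIM (what is proved, stated in full; the proofs are below) =====
def Claim_equal_try_options : Prop := ∀ (listofmultiplications : List (List Int)) (values : List Int) (vref : Int), Dom_try_options listofmultiplications values vref → Pre_try_options listofmultiplications values vref → Spec_try_options listofmultiplications values vref (try_options listofmultiplications values vref)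

-- ===== LEMMAS AND PROOFS =====

-- forward step of A's inner loop
def pvStep (r : Int) (dv : Int × Int) : Int := if dv.1 > 0 then r * dv.2 else r + dv.2

-- (a == b) as a decide, with the equation flipped the way the spec states it
theorem pvBeqDec (a b : Int) : (a == b) = decide (b = a) := by
  by_cases h : a = b
  · subst h; simp
  · simp [h, Ne.symm h]

-- Backward check on the reversed pair list decides whether the forward fold hits the target.
theorem pvReachAux_correct (first : Int) :
    ∀ (l : List (Int × Int)) (t : Int),
      pvReachAux first l t = decide (l.reverse.foldl pvStep first = t) := by
  intro l
  induction l with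
  | nil => intro t; simp only [pvReachAux, List.reverse_nil, List.foldl_nil]; exact pvBeqDec t first
  | cons p rest ih =>
    intro t
    obtain ⟨d, v⟩ := p
    simp only [pvReachAux, List.reverse_cons, List.foldl_append, List.foldl_cons, List.foldl_nil]
    set F := rest.reverse.foldl pvStep first with hF
    by_cases hd : d > 0
    · have hstep : pvStep F (d, v) = F * v := by simp [pvStep, hd]
      rw [if_pos hd, hstep]
      by_cases hv : v = 0
      · subst hv
        simp only [beq_self_eq_true, if_true, mul_zero]
        exact pvBeqDec t 0
      · have hv' : (v == 0) = false := by simp [hv]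
        rw [hv', if_neg Bool.false_ne_true]
        by_cases hm : PySem.Int.mod t v = 0
        · have hdvd := (PySem.Int.mod_eq_zero_iff_dvd t v).mp hm
          have h1 := PySem.Int.floordiv_mul_add_mod t v
          rw [hm, add_zero] at h1
          obtain ⟨c, hc⟩ := hdvd
          have hfd : PySem.Int.floordiv t v = c := mul_right_cancel₀ hv (by rw [h1, hc]; ring)
          simp only [hm, beq_self_eq_true, if_true]
          rw [ih, hfd]
          refine decide_eq_decide.mpr ⟨fun h => by rw [h, hc]; ring, fun h => ?_⟩
          exact mul_right_cancel₀ hv (by rw [h, hc]; ring)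
        · have hm' : (PySem.Int.mod t v == 0) = false := by simp [hm]
          rw [hm', if_neg Bool.false_ne_true]
          have hne : ¬ (F * v = t) := fun h =>
            hm ((PySem.Int.mod_eq_zero_iff_dvd t v).mpr ⟨F, by rw [← h]; ring⟩)
          exact (decide_eq_false hne).symm
    · have hstep : pvStep F (d, v) = F + v := by simp [pvStep, hd]
      rw [if_neg hd, hstep, ih]
      exact decide_eq_decide.mpr (by omega)

-- A's outer loop with a sticky flag equals the disjunction over patterns.
theorem pvFoldFlag (p : List Int → Bool) :
    ∀ (lom : List (List Int)) (b : Bool),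
      lom.foldl (fun m d => if p d then true else m) b = (b || lom.any p) := by
  intro lom
  induction lom with
  | nil => intro b; simp
  | cons d rest ih =>
    intro b
    simp only [List.foldl_cons, List.any_cons, ih]
    by_cases h : p d = true <;> simp [h]

theorem pvAnyCongr {α : Type} (f g : α → Bool) :
    ∀ (l : List α), (∀ a ∈ l, f a = g a) → l.any f = l.any g := by
  intro l
  induction l with
  | nil => intro _; rfl
  | cons x xs ih =>
    intro h
    simp only [List.any_cons, h x (List.mem_cons_self), ih (fun a ha => h a (List.mem_cons_of_mem _ ha))]

-- ===== VERDICT (by name: the statement is the Claim_ definition above) =====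
theorem try_options_spec : Claim_equal_try_options := by
  intro lom values vref _ _
  unfold Spec_try_options try_options try_options_alt
  have := pvFoldFlag (fun dtypes =>
    ((dtypes.zip (PySem.List.slice values (some 1) none)).foldl
      (fun r dv => if dv.1 > 0 then r * dv.2 else r + dv.2)
      ((PySem.List.pyGet? values 0).getD 0)) == vref) lom false
  simp only [Bool.false_or] at this
  rw [this]
  refine pvAnyCongr _ _ lom (fun dtypes _ => ?_)
  unfold pvReach
  rw [pvReachAux_correct, List.reverse_reverse]
  have hstep : (fun r dv => if dv.1 > 0 then r * dv.2 else r + dv.2) = pvStep := rfl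
  rw [hstep]
  exact (Bool.beq_eq_decide_eq _ _)
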